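-- pv_equiv track=rewrite | github.com/DilaAsln/server__client | src/encryptor.py | route_decrypt
-- ===== SOURCE A (Python) =====
-- import math
--
-- def route_decrypt(text, key):
--     key = int(key)
--     if key <= 1:
--         raise ValueError("Route Cipher anahtarı 1'den büyük olmalıdır.")
--
--     num_cols = key
--     num_rows = math.ceil(len(text) / num_cols)
--
--     matrix = [['\n'] * num_cols for _ in range(num_rows)]
--     text_index = 0
--
--
--     for c in range(num_cols):
--         if c % 2 == 0:
--             for r in range(num_rows):
--                 if text_index < len(text):
--                     matrix[r][c] = text[text_index]
--                     text_index += 1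
--         else:
--             for r in range(num_rows - 1, -1, -1):
--                 if text_index < len(text):
--                     matrix[r][c] = text[text_index]
--                     text_index += 1
--
--     result = ""
--     for r in range(num_rows):
--         for c in range(num_cols):
--             if matrix[r][c] != '\n' and matrix[r][c] != 'X':
--                 result += matrix[r][c]
--
--     return result
-- ===== SOURCE B (Python) =====
-- import math
--
-- def route_decrypt(text, key):
--     key = int(key)
--     if key <= 1:
--         raise ValueError("Route Cipher anahtarı 1'den büyük olmalıdır.")
--
--     num_rows = math.ceil(len(text) / key)
--     cells = []
--     for i, ch in enumerate(text):
--         c, p = divmod(i, num_rows)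
--         r = p if c % 2 == 0 else num_rows - 1 - p
--         cells.append((r, c, ch))
--     cells.sort(key=lambda t: (t[0], t[1]))
--     return "".join(ch for _, _, ch in cells if ch != '\n' and ch != 'X')
-- ===== Notes on version B (the rewrite author's own statement) =====
-- stated objective: alternative
-- what changed: Replaces the boustrophedon column-by-column fill of a mutable num_rows x num_cols grid (plus a row-major grid scan) by a single pass that computes each character's destination (row, col) with a closed-form div/mod formula and one sort of the (row, col, char) triples by (row, col); no grid is materialized.
import Mathlib
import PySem

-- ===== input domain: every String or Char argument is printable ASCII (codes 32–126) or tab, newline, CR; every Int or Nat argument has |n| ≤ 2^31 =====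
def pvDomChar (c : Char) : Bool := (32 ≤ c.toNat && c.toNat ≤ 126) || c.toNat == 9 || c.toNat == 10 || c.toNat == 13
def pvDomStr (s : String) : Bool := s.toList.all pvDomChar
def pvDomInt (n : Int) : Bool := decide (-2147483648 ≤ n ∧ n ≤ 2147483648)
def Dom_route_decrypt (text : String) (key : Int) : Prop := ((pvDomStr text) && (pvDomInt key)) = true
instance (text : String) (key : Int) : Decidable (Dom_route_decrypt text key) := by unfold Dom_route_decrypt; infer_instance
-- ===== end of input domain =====

-- B replaces A's boustrophedon column-fill of a mutable grid by a closed-form per-character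
-- coordinate formula plus one sort of (row, col, char) triples; equivalence on key ≥ 2 (key ≤ 1 raises in Python).

-- ===== PORT A =====
def route_decrypt (text : String) (key : Int) : String :=
  -- key = int(key) is the identity on an Int argument; key ≤ 1: Python raises ValueError (excluded by Pre_)
  if key ≤ 1 then "" else
  let tl := text.toList
  let num_cols := key
  -- math.ceil(len(text) / num_cols), exact on ints of this size: -((-n) // num_cols)
  let num_rows : Int := -(PySem.Int.floordiv (-(tl.length : Int)) num_cols)
  let matrix : List (List Char) := (PySem.List.pyRange 0 num_rows 1).map (fun _ => List.replicate num_cols.toNat '\n')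
  let st :=
    (PySem.List.pyRange 0 num_cols 1).foldl (fun (st : List (List Char) × Int) c =>
      if PySem.Int.mod c 2 = 0 then
        (PySem.List.pyRange 0 num_rows 1).foldl (fun st r =>
          if st.2 < (tl.length : Int) then
            (st.1.set r.toNat ((st.1.getD r.toNat []).set c.toNat (tl.getD st.2.toNat ' ')), st.2 + 1)
          else st) st
      else
        (PySem.List.pyRange (num_rows - 1) (-1) (-1)).foldl (fun st r =>
          if st.2 < (tl.length : Int) then
            (st.1.set r.toNat ((st.1.getD r.toNat []).set c.toNat (tl.getD st.2.toNat ' ')), st.2 + 1)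
          else st) st)
      (matrix, (0 : Int))
  let result :=
    (PySem.List.pyRange 0 num_rows 1).foldl (fun (acc : List Char) r =>
      -- 'for c in range(num_cols): … matrix[r][c] …' iterated directly over row r,
      -- which holds exactly the num_cols entries matrix[r][0..num_cols-1] in order
      (st.1.getD r.toNat []).foldl (fun acc ch =>
        if ch ≠ '\n' ∧ ch ≠ 'X' then acc ++ [ch] else acc) acc) []
  String.ofList result

-- ===== PORT B =====
def route_decrypt_alt (text : String) (key : Int) : String :=
  if key ≤ 1 then "" else
  let tl := text.toList
  let num_rows : Int := -(PySem.Int.floordiv (-(tl.length : Int)) key)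
  let cells := (PySem.List.enumerate tl).map (fun p =>
    let c := PySem.Int.floordiv p.1 num_rows
    let q := PySem.Int.mod p.1 num_rows
    let r := if PySem.Int.mod c 2 = 0 then q else num_rows - 1 - q
    (r, c, p.2))
  let sorted := PySem.List.sorted2 cells (fun t => t.1) (fun t => t.2.1)
  String.ofList ((sorted.filter (fun t => decide (t.2.2 ≠ '\n' ∧ t.2.2 ≠ 'X'))).map (fun t => t.2.2))

-- ===== PRECONDITION & SPEC =====
-- Pre_ excludes exactly key ≤ 1, where the Python raises ValueError.
def Pre_route_decrypt (text : String) (key : Int) : Prop := 2 ≤ key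
instance (text : String) (key : Int) : Decidable (Pre_route_decrypt text key) := by unfold Pre_route_decrypt; infer_instance
def pvWitness_route_decrypt : String × Int := ("HELLOX", 3)
def Spec_route_decrypt (text : String) (key : Int) (out : String) : Prop := out = route_decrypt_alt text key
instance (text : String) (key : Int) (out : String) : Decidable (Spec_route_decrypt text key out) := by unfold Spec_route_decrypt; infer_instance

-- ===== CLAIM (what is proved, stated in full; the proofs are below) =====
def Claim_equal_route_decrypt : Prop := ∀ (text : String) (key : Int), Dom_route_decrypt text key → Pre_route_decrypt text key → Spec_route_decrypt text key (route_decrypt text key)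

-- ===== LEMMAS AND PROOFS =====

-- proof-side vocabulary
def pvIdx (m r c : Nat) : Nat := c * m + (if c % 2 = 0 then r else m - 1 - r)
def pvRowN (m i : Nat) : Nat := if (i / m) % 2 = 0 then i % m else m - 1 - i % m
def pvKeep (ch : Char) : Bool := decide (ch ≠ '\n' ∧ ch ≠ 'X')
def pvE (mat : List (List Char)) (r c : Nat) : Char := (mat.getD r []).getD c '\n'
def pvCh (L : List Char) (m r c : Nat) : Char :=
  if pvIdx m r c < L.length then L.getD (pvIdx m r c) ' ' else '\n'
def pvCell (L : List Char) (m r c : Nat) : Option (Int × Int × Char) :=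
  if pvIdx m r c < L.length then some ((r : Int), (c : Int), L.getD (pvIdx m r c) ' ') else none
def pvYs (L : List Char) (m kk : Nat) : List (Int × Int × Char) :=
  (List.range m).flatMap (fun r => (List.range kk).filterMap (fun c => pvCell L m r c))
def pvOut (L : List Char) (m kk : Nat) : List Char :=
  ((pvYs L m kk).filter (fun t => pvKeep t.2.2)).map (fun t => t.2.2)
def pvStep (L : List Char) (c : Int) (st : List (List Char) × Int) (r : Int) : List (List Char) × Int :=
  if st.2 < (L.length : Int) then
    (st.1.set r.toNat ((st.1.getD r.toNat []).set c.toNat (L.getD st.2.toNat ' ')), st.2 + 1)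
  else st
def pvCol (L : List Char) (m : Int) (st : List (List Char) × Int) (c : Int) : List (List Char) × Int :=
  if PySem.Int.mod c 2 = 0 then (PySem.List.pyRange 0 m 1).foldl (pvStep L c) st
  else (PySem.List.pyRange (m - 1) (-1) (-1)).foldl (pvStep L c) st

def pvMat0 (kk mI : Int) : List (List Char) :=
  (PySem.List.pyRange 0 mI 1).map (fun _ => List.replicate kk.toNat '\n')
def pvFillM (L : List Char) (kk mI : Int) : List (List Char) :=
  ((PySem.List.pyRange 0 kk 1).foldl (pvCol L mI) (pvMat0 kk mI, (0 : Int))).1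
def pvRead (mat : List (List Char)) (mI : Int) : List Char :=
  (PySem.List.pyRange 0 mI 1).foldl (fun acc r =>
    (mat.getD r.toNat []).foldl (fun acc ch =>
      if ch ≠ '\n' ∧ ch ≠ 'X' then acc ++ [ch] else acc) acc) []
def pvTri (L : List Char) (m i : Nat) : Int × Int × Char :=
  ((pvRowN m i : Nat), ((i / m : Nat) : Int), L.getD i ' ')

-- arithmetic bridge: num_rows is the Nat ceiling
lemma pv_num_rows (n kk : Nat) (hk : 2 ≤ kk) :
    ∃ m : Nat, -(PySem.Int.floordiv (-((n : Nat) : Int)) ((kk : Nat) : Int)) = (m : Int) ∧ n ≤ kk * m := by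
  set q : Int := -(PySem.Int.floordiv (-((n : Nat) : Int)) ((kk : Nat) : Int)) with hq
  have hkpos : (0 : Int) < (kk : Int) := by exact_mod_cast Nat.lt_of_lt_of_le (by norm_num) hk
  have hbr := (PySem.Int.neg_floordiv_neg_eq_iff_of_pos (a := ((n : Nat) : Int)) (b := ((kk : Nat) : Int)) (q := q) hkpos).mp hq.symm
  have hq0 : 0 ≤ q := by
    by_contra h
    push_neg at h
    have h2 : q * (kk : Int) < 0 := mul_neg_of_neg_of_pos h hkpos
    have h3 : (0 : Int) ≤ (n : Int) := by positivity
    linarith [hbr.2]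
  refine ⟨q.toNat, by simp [Int.toNat_of_nonneg hq0], ?_⟩
  have h2 : ((n : Nat) : Int) ≤ ((q.toNat : Nat) : Int) * ((kk : Nat) : Int) := by
    rw [Int.toNat_of_nonneg hq0]; exact hbr.2
  have h3 : ((n : Nat) : Int) ≤ ((kk * q.toNat : Nat) : Int) := by push_cast at h2 ⊢; linarith
  exact_mod_cast h3

-- entry after a single write
lemma pvE_write (mat : List (List Char)) (r c : Nat) (ch : Char)
    (hr : r < mat.length) (hc : c < (mat.getD r []).length) (r' c' : Nat) :
    pvE (mat.set r ((mat.getD r []).set c ch)) r' c' = if r' = r ∧ c' = c then ch else pvE mat r' c' := by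
  unfold pvE
  by_cases h1 : r' = r
  · subst h1
    have houter : (mat.set r' ((mat.getD r' []).set c ch)).getD r' [] = (mat.getD r' []).set c ch := by
      simp [List.getD_eq_getElem?_getD, List.getElem?_set, hr]
    rw [houter]
    by_cases h2 : c' = c
    · subst h2
      rw [List.getD_eq_getElem?_getD] at hc
      simp [List.getD_eq_getElem?_getD, List.getElem?_set, hc]
    · simp [List.getD_eq_getElem?_getD, List.getElem?_set, Ne.symm h2, h2]
  · have houter : (mat.set r ((mat.getD r []).set c ch)).getD r' [] = mat.getD r' [] := by
      simp [List.getD_eq_getElem?_getD, List.getElem?_set, Ne.symm h1]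
    rw [houter]
    simp [h1]

-- one column of writes, generic over the traversal direction
lemma pvStepsEval (L : List Char) (kk m c : Nat) (hc : c < kk)
    (rowN invR : Nat → Nat) (hrow : ∀ j, j < m → rowN j < m) (hinv : ∀ j, j < m → invR (rowN j) = j) :
    ∀ t, t ≤ m → ∀ (mat : List (List Char)), mat.length = m → (∀ row ∈ mat, row.length = kk) →
    ((List.range t).foldl (fun st j => pvStep L (c : Int) st ((rowN j : Nat) : Int))
        (mat, ((min L.length (c * m) : Nat) : Int))).2 = ((min L.length (c * m + t) : Nat) : Int) ∧
    ((List.range t).foldl (fun st j => pvStep L (c : Int) st ((rowN j : Nat) : Int))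
        (mat, ((min L.length (c * m) : Nat) : Int))).1.length = m ∧
    (∀ row ∈ ((List.range t).foldl (fun st j => pvStep L (c : Int) st ((rowN j : Nat) : Int))
        (mat, ((min L.length (c * m) : Nat) : Int))).1, row.length = kk) ∧
    (∀ r c' : Nat, pvE ((List.range t).foldl (fun st j => pvStep L (c : Int) st ((rowN j : Nat) : Int))
        (mat, ((min L.length (c * m) : Nat) : Int))).1 r c' =
      if (∃ j, j < t ∧ rowN j = r ∧ c * m + j < L.length) ∧ c' = c
      then L.getD (c * m + invR r) ' ' else pvE mat r c') := by
  intro t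
  induction t with
  | zero =>
    intro _ mat hlen hrows
    refine ⟨by simp, by simpa, by simpa, ?_⟩
    intro r c'
    simp
  | succ t ihs =>
    intro ht mat hlen hrows
    obtain ⟨h2, hlen', hrows', hE⟩ := ihs (Nat.le_of_succ_le ht) mat hlen hrows
    have htm : t < m := ht
    rw [List.range_succ, List.foldl_append, List.foldl_cons, List.foldl_nil]
    set st := (List.range t).foldl (fun st j => pvStep L (c : Int) st ((rowN j : Nat) : Int))
        (mat, ((min L.length (c * m) : Nat) : Int)) with hst
    by_cases hlt : c * m + t < L.length
    · have hguard : st.2 < (L.length : Int) := by rw [h2]; omega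
      have hr1 : rowN t < st.1.length := by rw [hlen']; exact hrow t htm
      have hrowmem : st.1.getD (rowN t) [] ∈ st.1 := by
        rw [List.getD_eq_getElem _ _ hr1]; exact List.getElem_mem hr1
      have hc1 : c < (st.1.getD (rowN t) []).length := by rw [hrows' _ hrowmem]; exact hc
      have hsimp : pvStep L (c : Int) st ((rowN t : Nat) : Int)
          = (st.1.set (rowN t) ((st.1.getD (rowN t) []).set c (L.getD (c * m + t) ' ')), st.2 + 1) := by
        unfold pvStep
        rw [if_pos hguard]
        have hti : st.2.toNat = c * m + t := by rw [h2]; omega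
        simp [hti]
      rw [hsimp]
      refine ⟨?_, ?_, ?_, ?_⟩
      · simp only []
        rw [h2]; push_cast; omega
      · simp only [List.length_set]; exact hlen'
      · intro row hrowm
        rcases List.mem_or_eq_of_mem_set hrowm with h | h
        · exact hrows' _ h
        · rw [h, List.length_set]; exact hrows' _ hrowmem
      · intro r c'
        simp only []
        rw [pvE_write st.1 (rowN t) c _ hr1 hc1 r c']
        by_cases hcc : c' = c
        · by_cases hrr : r = rowN t
          · rw [if_pos ⟨hrr, hcc⟩, if_pos ⟨⟨t, Nat.lt_succ_self t, hrr.symm, hlt⟩, hcc⟩, hrr,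
              hinv t htm]
          · rw [if_neg (fun h => hrr h.1), hE r c']
            have hiff : (∃ j, j < t + 1 ∧ rowN j = r ∧ c * m + j < L.length)
                ↔ (∃ j, j < t ∧ rowN j = r ∧ c * m + j < L.length) := by
              constructor
              · rintro ⟨j, hj, hjr, hjl⟩
                rcases Nat.lt_succ_iff_lt_or_eq.mp hj with h | h
                · exact ⟨j, h, hjr, hjl⟩
                · subst h; exact absurd hjr.symm hrr
              · rintro ⟨j, hj, hjr, hjl⟩; exact ⟨j, Nat.lt_succ_of_lt hj, hjr, hjl⟩
            by_cases hex : ∃ j, j < t ∧ rowN j = r ∧ c * m + j < L.length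
            · rw [if_pos ⟨hex, hcc⟩, if_pos ⟨hiff.mpr hex, hcc⟩]
            · rw [if_neg (fun h => hex h.1), if_neg (fun h => hex (hiff.mp h.1))]
        · rw [if_neg (fun h => hcc h.2), hE r c', if_neg (fun h => hcc h.2),
            if_neg (fun h => hcc h.2)]
    · have hguard : ¬ st.2 < (L.length : Int) := by rw [h2]; omega
      have hsimp : pvStep L (c : Int) st ((rowN t : Nat) : Int) = st := by
        unfold pvStep; rw [if_neg hguard]
      rw [hsimp]
      refine ⟨?_, hlen', hrows', ?_⟩
      · rw [h2]; congr 1; omega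
      · intro r c'
        rw [hE r c']
        have hiff : (∃ j, j < t + 1 ∧ rowN j = r ∧ c * m + j < L.length)
            ↔ (∃ j, j < t ∧ rowN j = r ∧ c * m + j < L.length) := by
          constructor
          · rintro ⟨j, hj, hjr, hjl⟩
            rcases Nat.lt_succ_iff_lt_or_eq.mp hj with h | h
            · exact ⟨j, h, hjr, hjl⟩
            · subst h; omega
          · rintro ⟨j, hj, hjr, hjl⟩; exact ⟨j, Nat.lt_succ_of_lt hj, hjr, hjl⟩
        by_cases hcc : c' = c
        · by_cases hex : ∃ j, j < t ∧ rowN j = r ∧ c * m + j < L.length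
          · rw [if_pos ⟨hex, hcc⟩, if_pos ⟨hiff.mpr hex, hcc⟩]
          · rw [if_neg (fun h => hex h.1), if_neg (fun h => hex (hiff.mp h.1))]
        · rw [if_neg (fun h => hcc h.2), if_neg (fun h => hcc h.2)]

-- one column via pvCol
lemma pvColEval (L : List Char) (kk m c : Nat) (hc : c < kk)
    (mat : List (List Char)) (hlen : mat.length = m) (hrows : ∀ row ∈ mat, row.length = kk) :
    (pvCol L (m : Int) (mat, ((min L.length (c * m) : Nat) : Int)) (c : Int)).2
        = ((min L.length ((c + 1) * m) : Nat) : Int) ∧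
    (pvCol L (m : Int) (mat, ((min L.length (c * m) : Nat) : Int)) (c : Int)).1.length = m ∧
    (∀ row ∈ (pvCol L (m : Int) (mat, ((min L.length (c * m) : Nat) : Int)) (c : Int)).1, row.length = kk) ∧
    (∀ r c' : Nat, pvE (pvCol L (m : Int) (mat, ((min L.length (c * m) : Nat) : Int)) (c : Int)).1 r c' =
      if r < m ∧ c' = c ∧ pvIdx m r c' < L.length then L.getD (pvIdx m r c') ' ' else pvE mat r c') := by
  have hcm : (c + 1) * m = c * m + m := by ring
  unfold pvCol
  by_cases hpar : c % 2 = 0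
  · have hm2 : PySem.Int.mod (c : Int) 2 = 0 := by
      rw [show ((2 : Int)) = ((2 : Nat) : Int) from by norm_num, PySem.Int.mod_natCast, hpar]
      norm_num
    rw [if_pos hm2, PySem.List.pyRange_zero_nat, List.foldl_map]
    obtain ⟨h2, hlen2, hrows2, hE⟩ := pvStepsEval L kk m c hc (fun j => j) (fun r => r)
      (fun j h => h) (fun j _ => rfl) m le_rfl mat hlen hrows
    refine ⟨by rw [hcm]; exact h2, hlen2, hrows2, ?_⟩
    intro r c'
    refine (hE r c').trans ?_
    by_cases hcc : c' = c
    · have hidx : pvIdx m r c' = c * m + r := by subst hcc; unfold pvIdx; rw [if_pos hpar]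
      by_cases hrm : r < m ∧ c * m + r < L.length
      · rw [if_pos ⟨⟨r, hrm.1, rfl, hrm.2⟩, hcc⟩, if_pos ⟨hrm.1, hcc, by omega⟩, hidx]
      · rw [if_neg ?_, if_neg ?_]
        · rintro ⟨h1, _, h3⟩; rw [hidx] at h3; exact hrm ⟨h1, h3⟩
        · rintro ⟨⟨j, hj, rfl, hjl⟩, _⟩; exact hrm ⟨hj, hjl⟩
    · rw [if_neg (fun h => hcc h.2), if_neg (fun h => hcc h.2.1)]
  · have hm2 : ¬ PySem.Int.mod (c : Int) 2 = 0 := by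
      rw [show ((2 : Int)) = ((2 : Nat) : Int) from by norm_num, PySem.Int.mod_natCast]
      exact_mod_cast hpar
    rw [if_neg hm2, PySem.List.pyRange_neg_one, show ((m : Int) - 1 - (-1)).toNat = m from by omega,
      List.foldl_map]
    have hfun : ∀ (st : List (List Char) × Int), ∀ j ∈ List.range m,
        pvStep L (c : Int) st ((m : Int) - 1 - (j : Nat)) = pvStep L (c : Int) st (((m - 1 - j : Nat) : Nat) : Int) := by
      intro st j hj
      rw [List.mem_range] at hj
      congr 1
      omega
    rw [PySem.List.foldl_congr_mem _ _ _ _ hfun]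
    obtain ⟨h2, hlen2, hrows2, hE⟩ := pvStepsEval L kk m c hc (fun j => m - 1 - j) (fun r => m - 1 - r)
      (fun j hj => by show m - 1 - j < m; omega) (fun j hj => by show m - 1 - (m - 1 - j) = j; omega)
      m le_rfl mat hlen hrows
    refine ⟨by rw [hcm]; exact h2, hlen2, hrows2, ?_⟩
    intro r c'
    refine (hE r c').trans ?_
    by_cases hcc : c' = c
    · have hidx : pvIdx m r c' = c * m + (m - 1 - r) := by subst hcc; unfold pvIdx; rw [if_neg hpar]
      by_cases hrm : r < m ∧ c * m + (m - 1 - r) < L.length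
      · rw [if_pos ⟨⟨m - 1 - r, by omega, by omega, hrm.2⟩, hcc⟩, if_pos ⟨hrm.1, hcc, by omega⟩, hidx]
      · rw [if_neg ?_, if_neg ?_]
        · rintro ⟨h1, _, h3⟩; rw [hidx] at h3; exact hrm ⟨h1, h3⟩
        · rintro ⟨⟨j, hj, hjr, hjl⟩, _⟩
          exact hrm ⟨by omega, by rw [show m - 1 - r = j from by omega]; exact hjl⟩
    · rw [if_neg (fun h => hcc h.2), if_neg (fun h => hcc h.2.1)]

-- the whole fill
lemma pvFill (L : List Char) (kk m : Nat) :
    ∀ j, j ≤ kk → ∀ (mat0 : List (List Char)), mat0.length = m → (∀ row ∈ mat0, row.length = kk) →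
    (∀ r c : Nat, pvE mat0 r c = '\n') →
    ((List.range j).foldl (fun st cN => pvCol L (m : Int) st ((cN : Nat) : Int)) (mat0, (0 : Int))).2 = ((min L.length (j * m) : Nat) : Int) ∧
    ((List.range j).foldl (fun st cN => pvCol L (m : Int) st ((cN : Nat) : Int)) (mat0, (0 : Int))).1.length = m ∧
    (∀ row ∈ ((List.range j).foldl (fun st cN => pvCol L (m : Int) st ((cN : Nat) : Int)) (mat0, (0 : Int))).1, row.length = kk) ∧
    (∀ r c : Nat, pvE ((List.range j).foldl (fun st cN => pvCol L (m : Int) st ((cN : Nat) : Int)) (mat0, (0 : Int))).1 r c =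
      if r < m ∧ c < j ∧ pvIdx m r c < L.length then L.getD (pvIdx m r c) ' ' else '\n') := by
  intro j
  induction j with
  | zero =>
    intro _ mat0 h1 h2 h3
    refine ⟨by simp, h1, h2, ?_⟩
    intro r c
    rw [if_neg (by omega)]
    exact h3 r c
  | succ j ih =>
    intro hj mat0 h1 h2 h3
    obtain ⟨i2, ilen, irows, iE⟩ := ih (Nat.le_of_succ_le hj) mat0 h1 h2 h3
    rw [List.range_succ, List.foldl_append, List.foldl_cons, List.foldl_nil]
    set st := (List.range j).foldl (fun st cN => pvCol L (m : Int) st ((cN : Nat) : Int)) (mat0, (0 : Int)) with hst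
    have hpair : pvCol L (m : Int) st ((j : Nat) : Int)
        = pvCol L (m : Int) (st.1, ((min L.length (j * m) : Nat) : Int)) ((j : Nat) : Int) := by
      rw [← i2]
    rw [hpair]
    obtain ⟨g2, glen, grows, gE⟩ := pvColEval L kk m j hj st.1 ilen irows
    refine ⟨g2, glen, grows, ?_⟩
    intro r c
    rw [gE r c]
    by_cases hcc : c = j
    · by_cases hcond : r < m ∧ pvIdx m r c < L.length
      · rw [if_pos ⟨hcond.1, hcc, hcond.2⟩, if_pos ⟨hcond.1, by omega, hcond.2⟩]
      · rw [if_neg (fun h => hcond ⟨h.1, h.2.2⟩), iE r c, if_neg (by omega),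
          if_neg (fun h => hcond ⟨h.1, h.2.2⟩)]
    · rw [if_neg (by tauto), iE r c]
      by_cases hcond : r < m ∧ c < j ∧ pvIdx m r c < L.length
      · rw [if_pos hcond, if_pos ⟨hcond.1, by omega, hcond.2.2⟩]
      · rw [if_neg hcond, if_neg (by rintro ⟨a, b, d⟩; exact hcond ⟨a, by omega, d⟩)]

-- row read: filter+map over characters = filter+map over cells
lemma pvRowRead (L : List Char) (m r : Nat) (l : List Nat) :
    ((l.filter (fun c => pvKeep (pvCh L m r c))).map (fun c => pvCh L m r c))
      = ((l.filterMap (fun c => pvCell L m r c)).filter (fun t => pvKeep t.2.2)).map (fun t => t.2.2) := by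
  induction l with
  | nil => rfl
  | cons c cs ih =>
    by_cases hidx : pvIdx m r c < L.length
    · have hch : pvCh L m r c = L.getD (pvIdx m r c) ' ' := by simp [pvCh, hidx]
      have hcl : pvCell L m r c = some ((r : Int), (c : Int), L.getD (pvIdx m r c) ' ') := by
        simp [pvCell, hidx]
      simp only [List.filter_cons, List.filterMap_cons, hch, hcl]
      by_cases hkeep : pvKeep (L.getD (pvIdx m r c) ' ') = true
      · simp only [hkeep, if_true, List.map_cons, ih, hch]
      · simp only [Bool.not_eq_true] at hkeep
        simp only [hkeep, Bool.false_eq_true, if_false, ih]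
    · have hch : pvCh L m r c = '\n' := by simp [pvCh, hidx]
      have hcl : pvCell L m r c = none := by simp [pvCell, hidx]
      simp only [List.filter_cons, List.filterMap_cons, hch, hcl]
      have hnl : pvKeep '\n' = false := rfl
      simp only [hnl, Bool.false_eq_true, if_false, ih]

-- divmod bijection, forward
lemma pvBij1 (kk m i n : Nat) (hi : i < n) (hn : n ≤ kk * m) :
    i / m < kk ∧ pvRowN m i < m ∧ pvIdx m (pvRowN m i) (i / m) = i := by
  have hm : 0 < m := by
    rcases Nat.eq_zero_or_pos m with h | h
    · subst h; rw [Nat.mul_zero] at hn; omega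
    · exact h
  have h1 : i / m < kk := by
    rw [Nat.div_lt_iff_lt_mul hm]
    calc i < n := hi
      _ ≤ kk * m := hn
  have h2 : i % m < m := Nat.mod_lt _ hm
  have hdm := Nat.div_add_mod i m
  refine ⟨h1, ?_, ?_⟩
  · unfold pvRowN; split_ifs <;> omega
  · unfold pvRowN pvIdx
    split_ifs with hpar
    · have hcm : m * (i / m) = (i / m) * m := Nat.mul_comm _ _
      omega
    · have h3 : m - 1 - (m - 1 - i % m) = i % m := by omega
      have hcm : m * (i / m) = (i / m) * m := Nat.mul_comm _ _
      omega

-- divmod bijection, backward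
lemma pvBij2 (m r c : Nat) (hr : r < m) :
    pvIdx m r c / m = c ∧ pvRowN m (pvIdx m r c) = r := by
  have hm : 0 < m := lt_of_le_of_lt (Nat.zero_le r) hr
  have hsm : (if c % 2 = 0 then r else m - 1 - r) < m := by split_ifs <;> omega
  have hidx : pvIdx m r c = (if c % 2 = 0 then r else m - 1 - r) + c * m := by
    unfold pvIdx; omega
  have hdiv : pvIdx m r c / m = c := by
    rw [hidx, Nat.mul_comm c m, Nat.add_mul_div_left _ _ hm, Nat.div_eq_of_lt hsm]
    omega
  have hmod : pvIdx m r c % m = (if c % 2 = 0 then r else m - 1 - r) := by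
    rw [hidx, Nat.mul_comm c m,
      show (if c % 2 = 0 then r else m - 1 - r) + m * c = (if c % 2 = 0 then r else m - 1 - r) + c * m from by ring,
      Nat.add_mul_mod_self_right, Nat.mod_eq_of_lt hsm]
  refine ⟨hdiv, ?_⟩
  unfold pvRowN
  rw [hdiv, hmod]
  split_ifs with hpar
  · rfl
  · omega

-- sorted2 with two Int keys is sorted with the lexicographic key
lemma pv_sorted2_eq_lex {α : Type} (xs : List α) (k1 k2 : α → Int) :
    PySem.List.sorted2 xs k1 k2 = PySem.List.sorted xs (fun x => toLex (k1 x, k2 x)) := by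
  rw [PySem.List.sorted_eq_foldl_insertBy]
  show List.foldl (fun acc x => PySem.List.insertBy
      (fun a b => decide (k1 a < k1 b) || (!decide (k1 b < k1 a) && decide (k2 a < k2 b))) x acc) [] xs = _
  have hfun : (fun (a b : α) => decide (k1 a < k1 b) || (!decide (k1 b < k1 a) && decide (k2 a < k2 b)))
      = (fun a b => decide ((fun x => toLex (k1 x, k2 x)) a < (fun x => toLex (k1 x, k2 x)) b)) := by
    funext a b
    simp only [Prod.Lex.lt_iff, ofLex_toLex]
    rcases lt_trichotomy (k1 a) (k1 b) with h | h | h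
    · simp [h]
    · simp [h, lt_irrefl]
    · simp [lt_asymm h, h, ne_of_gt h, (ne_of_gt h).symm]
  rw [hfun]

lemma pvMat0_eq (kk m : Nat) :
    pvMat0 ((kk : Nat) : Int) ((m : Nat) : Int) = List.replicate m (List.replicate kk '\n') := by
  unfold pvMat0
  rw [Int.toNat_natCast, PySem.List.pyRange_zero_nat, List.map_map]
  rw [show ((fun (_ : Int) => List.replicate kk '\n') ∘ fun (k : Nat) => ((k : Nat) : Int))
      = (fun (_ : Nat) => List.replicate kk '\n') from rfl]
  rw [List.map_const', List.length_range]

lemma pvE_rep (m kk : Nat) (r c : Nat) :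
    pvE (List.replicate m (List.replicate kk '\n')) r c = '\n' := by
  unfold pvE
  simp only [List.getD_eq_getElem?_getD, List.getElem?_replicate]
  by_cases hr : r < m
  · rw [if_pos hr]
    simp only [Option.getD_some, List.getElem?_replicate]
    by_cases hc : c < kk
    · rw [if_pos hc]; rfl
    · rw [if_neg hc]; rfl
  · rw [if_neg hr]; rfl

lemma pvRead_eval (L : List Char) (mat : List (List Char)) (m kk : Nat)
    (hrowl : ∀ r : Nat, r < m → mat.getD r [] = (List.range kk).map (pvCh L m r)) :
    pvRead mat (m : Int) = pvOut L m kk := by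
  unfold pvRead
  rw [PySem.List.pyRange_zero_nat m, List.foldl_map]
  simp only [Int.toNat_natCast]
  have hrow : ∀ (acc : List Char), ∀ rN ∈ List.range m,
      (List.foldl (fun acc (ch : Char) =>
        if ch ≠ '\n' ∧ ch ≠ 'X' then acc ++ [ch] else acc) acc (mat.getD rN []))
      = acc ++ ((List.range kk).filter (fun c => pvKeep (pvCh L m rN c))).map (fun c => pvCh L m rN c) := by
    intro acc rN hrN
    rw [List.mem_range] at hrN
    rw [hrowl rN hrN, List.foldl_map]
    rw [PySem.List.foldl_append_ite (fun cN => pvCh L m rN cN ≠ '\n' ∧ pvCh L m rN cN ≠ 'X')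
      (fun cN => pvCh L m rN cN)]
    rfl
  rw [PySem.List.foldl_congr_mem _ _ (fun acc (rN : Nat) =>
      acc ++ ((List.range kk).filter (fun c => pvKeep (pvCh L m rN c))).map (fun c => pvCh L m rN c)) _
    (by intro acc rN hrN; exact hrow acc rN hrN)]
  rw [PySem.List.foldl_append_eq_flatMap, List.nil_append]
  unfold pvOut pvYs
  rw [List.filter_flatMap, List.map_flatMap, List.flatMap_def, List.flatMap_def]
  exact congrArg List.flatten (List.map_congr_left (fun r _ => pvRowRead L m r (List.range kk)))

-- A evaluates to pvOut
lemma pvA_eval (text : String) (kk m : Nat) (hk : 2 ≤ kk)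
    (hm : -(PySem.Int.floordiv (-((text.toList.length : Nat) : Int)) ((kk : Nat) : Int)) = (m : Int))
    (hn : text.toList.length ≤ kk * m) :
    route_decrypt text (kk : Int) = String.ofList (pvOut text.toList m kk) := by
  have hk1 : ¬ ((kk : Int) ≤ 1) := by
    have h2 : (2 : Int) ≤ (kk : Int) := by exact_mod_cast hk
    omega
  have hA : route_decrypt text ((kk : Nat) : Int) = String.ofList
      (pvRead (pvFillM text.toList ((kk : Nat) : Int)
          (-(PySem.Int.floordiv (-((text.toList.length : Nat) : Int)) ((kk : Nat) : Int))))
        (-(PySem.Int.floordiv (-((text.toList.length : Nat) : Int)) ((kk : Nat) : Int)))) := by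
    unfold route_decrypt pvRead pvFillM pvMat0 pvCol pvStep
    rw [if_neg hk1]
  rw [hA, hm]
  refine congrArg String.ofList ?_
  have hfill := pvFill text.toList kk m kk le_rfl (List.replicate m (List.replicate kk '\n'))
    (by simp) (fun row h => by rw [List.eq_of_mem_replicate h]; simp) (pvE_rep m kk)
  have hFM : ∀ r c : Nat, r < m → c < kk →
      pvE (pvFillM text.toList ((kk : Nat) : Int) ((m : Nat) : Int)) r c = pvCh text.toList m r c := by
    intro r c hr hc
    have hconv : pvFillM text.toList ((kk : Nat) : Int) ((m : Nat) : Int)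
        = ((List.range kk).foldl (fun st cN => pvCol text.toList ((m : Nat) : Int) st ((cN : Nat) : Int))
            (List.replicate m (List.replicate kk '\n'), (0 : Int))).1 := by
      unfold pvFillM
      rw [pvMat0_eq, PySem.List.pyRange_zero_nat, List.foldl_map]
    rw [hconv, hfill.2.2.2 r c]
    unfold pvCh
    by_cases hidx : pvIdx m r c < text.toList.length
    · rw [if_pos ⟨hr, hc, hidx⟩, if_pos hidx]
    · rw [if_neg (by tauto), if_neg hidx]
  have hrowl : ∀ r : Nat, r < m →
      (pvFillM text.toList ((kk : Nat) : Int) ((m : Nat) : Int)).getD r []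
        = (List.range kk).map (pvCh text.toList m r) := by
    intro r hr
    have hconv : pvFillM text.toList ((kk : Nat) : Int) ((m : Nat) : Int)
        = ((List.range kk).foldl (fun st cN => pvCol text.toList ((m : Nat) : Int) st ((cN : Nat) : Int))
            (List.replicate m (List.replicate kk '\n'), (0 : Int))).1 := by
      unfold pvFillM
      rw [pvMat0_eq, PySem.List.pyRange_zero_nat, List.foldl_map]
    have hrlen : r < (pvFillM text.toList ((kk : Nat) : Int) ((m : Nat) : Int)).length := by
      rw [hconv, hfill.2.1]; exact hr
    have hmem : (pvFillM text.toList ((kk : Nat) : Int) ((m : Nat) : Int)).getD r []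
        ∈ pvFillM text.toList ((kk : Nat) : Int) ((m : Nat) : Int) := by
      rw [List.getD_eq_getElem _ _ hrlen]
      exact List.getElem_mem hrlen
    have hlenr : ((pvFillM text.toList ((kk : Nat) : Int) ((m : Nat) : Int)).getD r []).length = kk := by
      rw [hconv] at hmem ⊢
      exact hfill.2.2.1 _ hmem
    apply List.ext_getElem
    · rw [hlenr, List.length_map, List.length_range]
    · intro c hc1 hc2
      rw [List.length_map, List.length_range] at hc2
      have e1 : ((pvFillM text.toList ((kk : Nat) : Int) ((m : Nat) : Int)).getD r [])[c]
          = pvE (pvFillM text.toList ((kk : Nat) : Int) ((m : Nat) : Int)) r c := by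
        unfold pvE
        rw [List.getD_eq_getElem _ '\n' (by rw [hlenr]; exact hc2)]
      rw [e1, hFM r c hr hc2]
      simp
  exact pvRead_eval text.toList _ m kk hrowl

lemma pvCell_eq_some (L : List Char) (m r c : Nat) (t : Int × Int × Char)
    (h : pvCell L m r c = some t) :
    t = ((r : Int), (c : Int), L.getD (pvIdx m r c) ' ') ∧ pvIdx m r c < L.length := by
  unfold pvCell at h
  split_ifs at h with hidx
  exact ⟨(Option.some_injective _ h).symm, hidx⟩

lemma pvYs_mem (L : List Char) (m kk : Nat) (t : Int × Int × Char) :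
    t ∈ pvYs L m kk ↔ ∃ r c : Nat, r < m ∧ c < kk ∧ pvCell L m r c = some t := by
  simp only [pvYs, List.mem_flatMap, List.mem_filterMap, List.mem_range]
  constructor
  · rintro ⟨r, hr, c, hc, hcell⟩
    exact ⟨r, c, hr, hc, hcell⟩
  · rintro ⟨r, c, hr, hc, hcell⟩
    exact ⟨r, hr, c, hc, hcell⟩

lemma pvYs_pairwise (L : List Char) (m kk : Nat) :
    (pvYs L m kk).Pairwise (fun a b => toLex (a.1, a.2.1) < toLex (b.1, b.2.1)) := by
  unfold pvYs
  rw [List.flatMap_def, List.pairwise_flatten]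
  constructor
  · intro l' hl'
    rw [List.mem_map] at hl'
    obtain ⟨r, _, rfl⟩ := hl'
    rw [List.pairwise_filterMap]
    refine List.pairwise_lt_range.imp ?_
    intro c1 c2 hlt b hb b' hb'
    obtain ⟨rfl, _⟩ := pvCell_eq_some L m r c1 b hb
    obtain ⟨rfl, _⟩ := pvCell_eq_some L m r c2 b' hb'
    refine Prod.Lex.lt_iff.mpr ?_
    simp only [ofLex_toLex]
    exact Or.inr ⟨by trivial, by exact_mod_cast hlt⟩
  · rw [List.pairwise_map]
    refine List.pairwise_lt_range.imp ?_
    intro r1 r2 hlt x hx y hy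
    rw [List.mem_filterMap] at hx hy
    obtain ⟨c1, _, hx⟩ := hx
    obtain ⟨c2, _, hy⟩ := hy
    obtain ⟨rfl, _⟩ := pvCell_eq_some L m r1 c1 x hx
    obtain ⟨rfl, _⟩ := pvCell_eq_some L m r2 c2 y hy
    refine Prod.Lex.lt_iff.mpr ?_
    simp only [ofLex_toLex]
    exact Or.inl (by exact_mod_cast hlt)

lemma pvYs_nodup (L : List Char) (m kk : Nat) : (pvYs L m kk).Nodup :=
  (pvYs_pairwise L m kk).imp (fun {a b} h hab => absurd (hab ▸ h) (lt_irrefl _))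

lemma pvCells_nodup (L : List Char) (m kk n : Nat) (hn : n ≤ kk * m) :
    ((List.range n).map (pvTri L m)).Nodup := by
  refine List.Nodup.map_on ?_ List.nodup_range
  intro i hi j hj heq
  rw [List.mem_range] at hi hj
  obtain ⟨_, _, hidx⟩ := pvBij1 kk m i n hi hn
  obtain ⟨_, _, hidx'⟩ := pvBij1 kk m j n hj hn
  unfold pvTri at heq
  simp only [Prod.mk.injEq, Nat.cast_inj] at heq
  rw [← hidx, ← hidx', heq.1, heq.2.1]

lemma pvYs_perm (L : List Char) (m kk : Nat) (hn : L.length ≤ kk * m) :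
    (pvYs L m kk).Perm ((List.range L.length).map (pvTri L m)) := by
  rw [List.perm_ext_iff_of_nodup (pvYs_nodup L m kk) (pvCells_nodup L m kk L.length hn)]
  intro t
  rw [pvYs_mem, List.mem_map]
  constructor
  · rintro ⟨r, c, hr, hc, hcell⟩
    obtain ⟨ht, hidx⟩ := pvCell_eq_some L m r c t hcell
    refine ⟨pvIdx m r c, List.mem_range.mpr hidx, ?_⟩
    obtain ⟨hdiv, hrow⟩ := pvBij2 m r c hr
    unfold pvTri
    rw [hdiv, hrow, ht]
  · rintro ⟨i, hi, rfl⟩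
    rw [List.mem_range] at hi
    obtain ⟨hc, hr, hidx⟩ := pvBij1 kk m i L.length hi hn
    refine ⟨pvRowN m i, i / m, hr, hc, ?_⟩
    unfold pvCell
    rw [hidx, if_pos hi]
    rfl

-- B evaluates to pvOut
lemma pvB_eval (text : String) (kk m : Nat) (hk : 2 ≤ kk)
    (hm : -(PySem.Int.floordiv (-((text.toList.length : Nat) : Int)) ((kk : Nat) : Int)) = (m : Int))
    (hn : text.toList.length ≤ kk * m) :
    route_decrypt_alt text (kk : Int) = String.ofList (pvOut text.toList m kk) := by
  have hk1 : ¬ ((kk : Int) ≤ 1) := by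
    have h2 : (2 : Int) ≤ (kk : Int) := by exact_mod_cast hk
    omega
  simp only [route_decrypt_alt]
  rw [if_neg hk1, hm]
  rw [PySem.List.enumerate_eq_map_pyRange text.toList ' ']
  simp only [PySem.List.len_eq]
  rw [PySem.List.pyRange_zero_nat, List.map_map, List.map_map]
  have hF : ∀ i ∈ List.range text.toList.length,
      ((((fun p : Int × Char =>
            (if PySem.Int.mod (PySem.Int.floordiv p.1 ((m : Nat) : Int)) 2 = 0 then PySem.Int.mod p.1 ((m : Nat) : Int)
              else ((m : Nat) : Int) - 1 - PySem.Int.mod p.1 ((m : Nat) : Int),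
              PySem.Int.floordiv p.1 ((m : Nat) : Int), p.2)) ∘
          fun j : Int => (j, PySem.List.pyGetD text.toList j ' ')) ∘
          fun k : Nat => ((k : Nat) : Int)) i) = pvTri text.toList m i := by
    intro i hi
    rw [List.mem_range] at hi
    have hm0 : 0 < m := by
      rcases Nat.eq_zero_or_pos m with h | h
      · subst h; rw [Nat.mul_zero] at hn; omega
      · exact h
    have hmod := Nat.mod_lt i hm0
    simp only [Function.comp_apply]
    rw [PySem.List.pyGetD_natCast, PySem.Int.floordiv_natCast,
      show ((2 : Int)) = ((2 : Nat) : Int) from by norm_num, PySem.Int.mod_natCast,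
      PySem.Int.mod_natCast]
    unfold pvTri pvRowN
    by_cases hpar : (i / m) % 2 = 0
    · rw [hpar]
      norm_num
    · rw [if_neg (by exact_mod_cast hpar), if_neg hpar,
        show ((m : Nat) : Int) - 1 - ((i % m : Nat) : Int) = ((m - 1 - i % m : Nat) : Int) from by omega]
  rw [List.map_congr_left hF, pv_sorted2_eq_lex]
  rw [PySem.List.sorted_eq_of_perm_of_pairwise_lt _ (pvYs text.toList m kk) _
    (pvYs_perm text.toList m kk hn) (pvYs_pairwise text.toList m kk)]
  rfl

-- ===== VERDICT (by name: the statement is the Claim_ definition above) =====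
theorem route_decrypt_spec : Claim_equal_route_decrypt := by
  intro text key hdom hpre
  unfold Spec_route_decrypt
  have h0 : 0 ≤ key := le_trans (by norm_num) hpre
  obtain ⟨kk, rfl⟩ := Int.eq_ofNat_of_zero_le h0
  have hk : 2 ≤ kk := by unfold Pre_route_decrypt at hpre; exact_mod_cast hpre
  obtain ⟨m, hm, hn⟩ := pv_num_rows text.toList.length kk hk
  rw [pvA_eval text kk m hk hm hn, pvB_eval text kk m hk hm hn]
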